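-- pv_equiv track=rewrite | github.com/anna17rom/NetworkTechnologies | lab3/asciinema/zadanie1.py | frame_data
-- ===== SOURCE A (Python) =====
-- class CRC32:
--     def __init__(self):
--         # Inicjalizacja obiektu CRC32 poprzez wygenerowanie tablicy CRC.
--         self.crc_table = self.generate_crc_table()
--
--     def generate_crc_table(self):
--         # Definicja wielomianu użytego do obliczeń CRC i inicjalizacja pustej tablicy.
--         polynomial = 0xEDB88320
--         crc_table = []
--         # Generowanie tablicy CRC dla każdej możliwej wartości bajtu.
--         for i in range(256):
--             crc = i
--             for _ in range(8):
--                 # Obliczenie CRC dla pojedynczego bajtu.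
--                 if crc & 1:
--                     crc = (crc >> 1) ^ polynomial
--                 else:
--                     crc >>= 1
--             crc_table.append(crc)
--         return crc_table
--
--     def calculate_crc(self, data):
--         # Inicjalizacja wartości początkowej CRC.
--         crc = 0xFFFFFFFF
--         # Obliczenie CRC dla całego ciągu danych.
--         for byte in data:
--             crc = (crc >> 8) ^ self.crc_table[(crc ^ byte) & 0xFF]
--         # Końcowe XORowanie, aby uzyskać końcową wartość CRC.
--         return crc ^ 0xFFFFFFFF
--
-- def bit_stuffing(data):
--     # Dodanie '0' do sekwencji '11111' w danych, aby uniknąć problemów z markierami.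
--     return data.replace('11111', '111110')
--
-- def frame_data(data, frame_size):
--     framed_data = []
--     crc_calculator = CRC32()
--     for i in range(0, len(data), frame_size):
--         frame = data[i:i+frame_size]
--         crc = crc_calculator.calculate_crc(frame.encode('utf-8'))
--         crc_bits = f"{crc:032b}"
--         stuffed_frame = bit_stuffing(frame)
--         framed_data.append('01111110' + stuffed_frame + crc_bits + '01111110')
--     return framed_data
-- ===== SOURCE B (Python) =====
-- def frame_data(data, frame_size):
--     def crc32(bs):
--         # direct bitwise CRC-32 (reflected polynomial 0xEDB88320), no lookup table
--         crc = 0xFFFFFFFF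
--         for b in bs:
--             crc ^= b
--             for _ in range(8):
--                 crc = (crc >> 1) ^ 0xEDB88320 if crc & 1 else crc >> 1
--         return crc ^ 0xFFFFFFFF
--     chunks = (data[i:i + frame_size] for i in range(0, len(data), frame_size))
--     return ['01111110'
--             + f.replace('11111', '111110')
--             + format(crc32(f.encode('utf-8')), '032b')
--             + '01111110'
--             for f in chunks]
-- ===== Notes on version B (the rewrite author's own statement) =====
-- stated objective: simpler
-- what changed: The CRC32 class with its precomputed 256-entry lookup table and table-driven per-byte reduction is replaced by a direct table-free bitwise CRC-32 (8 shift/xor rounds per byte), and the frame loop with an accumulator list becomes a single comprehension over a chunk generator.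
import Mathlib
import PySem

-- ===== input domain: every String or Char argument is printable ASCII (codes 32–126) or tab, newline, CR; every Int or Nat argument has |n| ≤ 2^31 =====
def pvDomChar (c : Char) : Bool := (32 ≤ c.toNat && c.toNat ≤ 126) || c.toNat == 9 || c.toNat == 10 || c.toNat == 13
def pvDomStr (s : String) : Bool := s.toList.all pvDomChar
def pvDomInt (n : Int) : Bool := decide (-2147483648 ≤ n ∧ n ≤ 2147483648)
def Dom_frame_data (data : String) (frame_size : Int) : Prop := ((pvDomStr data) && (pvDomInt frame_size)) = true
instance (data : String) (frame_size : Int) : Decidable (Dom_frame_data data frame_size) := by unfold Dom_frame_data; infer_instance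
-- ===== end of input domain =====

-- B replaces A's CRC32 class (precomputed 256-entry table + table-driven reduction) with a direct
-- table-free bitwise CRC-32 and the accumulator frame loop with a comprehension; simpler, same asymptotic cost.


-- ===== PORT A =====
-- CRC32.generate_crc_table: for i in range(256): 8 rounds; append
def pvCrcTable : List Nat :=
  (List.range 256).foldl (fun tbl i =>
    tbl ++ [(List.range 8).foldl (fun crc _ =>
      if crc &&& 1 = 1 then (crc >>> 1) ^^^ 0xEDB88320 else crc >>> 1) i]) []

-- CRC32.calculate_crc
def pvCalcCrc (bytes : List Nat) : Nat :=
  (bytes.foldl (fun crc b => (crc >>> 8) ^^^ pvCrcTable.getD ((crc ^^^ b) &&& 0xFF) 0) 0xFFFFFFFF) ^^^ 0xFFFFFFFF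

-- f"{crc:032b}" for 0 ≤ crc (zero-padded binary)
def pvBits32 (n : Nat) : List Char :=
  let s := PySem.Int.toBinChars (n : Int)
  List.replicate (32 - s.length) '0' ++ s

def frame_data (data : String) (frame_size : Int) : List String :=
  (PySem.List.pyRange 0 (PySem.Str.len data) frame_size).foldl (fun acc i =>
    let frame := PySem.List.slice data.toList (some i) (some (i + frame_size))
    let crc := pvCalcCrc (frame.map Char.toNat)   -- frame.encode('utf-8'): exact, chars are ASCII on Dom
    acc ++ [String.ofList ("01111110".toList
              ++ PySem.Chars.replace frame "11111".toList "111110".toList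
              ++ pvBits32 crc ++ "01111110".toList)]) []

-- ===== PORT B =====
-- port of zlib.crc32 (standard CRC-32): classic bitwise per-byte reduction, no table
def pvZlibCrc32 (bytes : List Nat) : Nat :=
  (bytes.foldl (fun crc b =>
     (List.range 8).foldl (fun c _ =>
       if c &&& 1 = 1 then (c >>> 1) ^^^ 0xEDB88320 else c >>> 1) (crc ^^^ b)) 0xFFFFFFFF) ^^^ 0xFFFFFFFF

def frame_data_alt (data : String) (frame_size : Int) : List String :=
  ((PySem.List.pyRange 0 (PySem.Str.len data) frame_size).map
     (fun i => PySem.List.slice data.toList (some i) (some (i + frame_size)))).map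
    (fun frame => String.ofList ("01111110".toList
        ++ PySem.Chars.replace frame "11111".toList "111110".toList
        ++ pvBits32 (pvZlibCrc32 (frame.map Char.toNat)) ++ "01111110".toList))

-- ===== PRECONDITION & SPEC =====
-- Python's range raises ValueError when the step frame_size is 0 (in both A and B).
def Pre_frame_data (data : String) (frame_size : Int) : Prop := frame_size ≠ 0
instance (data : String) (frame_size : Int) : Decidable (Pre_frame_data data frame_size) := by unfold Pre_frame_data; infer_instance
def pvWitness_frame_data : String × Int := ("hello", 2)

def Spec_frame_data (data : String) (frame_size : Int) (out : List String) : Prop := out = frame_data_alt data frame_size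
instance (data : String) (frame_size : Int) (out : List String) : Decidable (Spec_frame_data data frame_size out) := by unfold Spec_frame_data; infer_instance

-- ===== CLAIM (what is proved, stated in full; the proofs are below) =====
def Claim_equal_frame_data : Prop := ∀ (data : String) (frame_size : Int), Dom_frame_data data frame_size → Pre_frame_data data frame_size → Spec_frame_data data frame_size (frame_data data frame_size)

-- ===== LEMMAS AND PROOFS =====

-- one CRC round, and k rounds
def pvRound (c : Nat) : Nat := if c &&& 1 = 1 then (c >>> 1) ^^^ 0xEDB88320 else c >>> 1
def pvRounds : Nat → Nat → Nat
  | 0, c => c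
  | k + 1, c => pvRounds k (pvRound c)

theorem pvFoldl8_eq_rounds (x : Nat) :
    (List.range 8).foldl (fun c _ =>
      if c &&& 1 = 1 then (c >>> 1) ^^^ 0xEDB88320 else c >>> 1) x = pvRounds 8 x := rfl

theorem pvTable_eq_map : pvCrcTable = (List.range 256).map (pvRounds 8) := by
  unfold pvCrcTable
  rw [PySem.List.foldl_append_singleton_eq_map]
  simp only [List.nil_append]
  exact List.map_congr_left fun i _ => pvFoldl8_eq_rounds i

theorem pvXor_shiftRight (a b n : Nat) : (a ^^^ b) >>> n = (a >>> n) ^^^ (b >>> n) := by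
  apply Nat.eq_of_testBit_eq
  intro i
  simp [Nat.testBit_shiftRight, Nat.testBit_xor]

theorem pvRound_xor_even (a b : Nat) (hb : b % 2 = 0) :
    pvRound (a ^^^ b) = pvRound a ^^^ (b >>> 1) := by
  have hb1 : b &&& 1 = 0 := by rw [Nat.and_one_is_mod]; exact hb
  have hand : (a ^^^ b) &&& 1 = a &&& 1 := by
    rw [Nat.and_xor_distrib_right, hb1, Nat.xor_zero]
  unfold pvRound
  rw [hand, pvXor_shiftRight]
  by_cases h : a &&& 1 = 1
  · rw [if_pos h, if_pos h, Nat.xor_assoc, Nat.xor_comm (b >>> 1), ← Nat.xor_assoc]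
  · rw [if_neg h, if_neg h]

theorem pvRounds_xor (k a b : Nat) (hb : b % 2 ^ k = 0) :
    pvRounds k (a ^^^ b) = pvRounds k a ^^^ (b >>> k) := by
  induction k generalizing a b with
  | zero => simp [pvRounds]
  | succ k ih =>
    obtain ⟨m, hm⟩ := Nat.dvd_of_mod_eq_zero hb
    have hm' : b = 2 * (2 ^ k * m) := by rw [hm, pow_succ]; ring
    have h2 : b % 2 = 0 := by omega
    have hhalf : (b >>> 1) % 2 ^ k = 0 := by
      rw [Nat.shiftRight_one]
      have hq : b / 2 = 2 ^ k * m := by omega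
      rw [hq]
      exact Nat.mul_mod_right _ _
    simp only [pvRounds]
    rw [pvRound_xor_even a b h2, ih _ _ hhalf]
    congr 1
    rw [← Nat.shiftRight_add, Nat.add_comm]

theorem pvRounds8_split (x : Nat) :
    pvRounds 8 x = pvRounds 8 (x &&& 255) ^^^ (x >>> 8) := by
  have hx : (x &&& 255) ^^^ (x ^^^ (x &&& 255)) = x := by
    rw [Nat.xor_comm x (x &&& 255), ← Nat.xor_assoc, Nat.xor_self, Nat.zero_xor]
  have hlow : (x ^^^ (x &&& 255)) % 2 ^ 8 = 0 := by
    have : (x ^^^ (x &&& 255)) &&& 255 = 0 := by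
      rw [Nat.and_xor_distrib_right, Nat.and_assoc]
      simp
    have h255 : (255 : Nat) = 2 ^ 8 - 1 := by norm_num
    rwa [h255, Nat.and_two_pow_sub_one_eq_mod] at this
  have hsh : (x ^^^ (x &&& 255)) >>> 8 = x >>> 8 := by
    rw [pvXor_shiftRight]
    have : (x &&& 255) >>> 8 = 0 := by
      have h : x &&& 255 ≤ 255 := Nat.and_le_right
      rw [Nat.shiftRight_eq_div_pow]
      omega
    rw [this, Nat.xor_zero]
  calc pvRounds 8 x = pvRounds 8 ((x &&& 255) ^^^ (x ^^^ (x &&& 255))) := by rw [hx]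
    _ = pvRounds 8 (x &&& 255) ^^^ ((x ^^^ (x &&& 255)) >>> 8) := pvRounds_xor 8 _ _ hlow
    _ = pvRounds 8 (x &&& 255) ^^^ (x >>> 8) := by rw [hsh]

-- A's per-byte step = B's per-byte step, for any byte < 256
theorem pvStep_eq (crc b : Nat) (hb : b < 256) :
    (crc >>> 8) ^^^ pvCrcTable.getD ((crc ^^^ b) &&& 0xFF) 0 =
    (List.range 8).foldl (fun c _ =>
      if c &&& 1 = 1 then (c >>> 1) ^^^ 0xEDB88320 else c >>> 1) (crc ^^^ b) := by
  rw [pvFoldl8_eq_rounds]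
  have hidx : (crc ^^^ b) &&& 0xFF < 256 := by
    have : (crc ^^^ b) &&& 0xFF ≤ 0xFF := Nat.and_le_right
    omega
  have hlen : ((List.range 256).map (pvRounds 8)).length = 256 := by simp
  have htbl : pvCrcTable.getD ((crc ^^^ b) &&& 0xFF) 0 = pvRounds 8 ((crc ^^^ b) &&& 0xFF) := by
    rw [pvTable_eq_map, List.getD_eq_getElem _ _ (by simpa using hidx), List.getElem_map,
        List.getElem_range]
  rw [htbl, pvRounds8_split (crc ^^^ b)]
  have hbsh : (crc ^^^ b) >>> 8 = crc >>> 8 := by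
    rw [pvXor_shiftRight]
    have : b >>> 8 = 0 := by rw [Nat.shiftRight_eq_div_pow]; omega
    rw [this, Nat.xor_zero]
  rw [hbsh, Nat.xor_comm]

theorem pvCrc_eq (bytes : List Nat) (h : ∀ b ∈ bytes, b < 256) :
    pvCalcCrc bytes = pvZlibCrc32 bytes := by
  unfold pvCalcCrc pvZlibCrc32
  congr 1
  exact PySem.List.foldl_congr_mem bytes _ _ _ (fun acc x hx => pvStep_eq acc x (h x hx))

theorem pvChar_lt (data : String) (hd : pvDomStr data = true) :
    ∀ c ∈ data.toList, c.toNat < 256 := by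
  intro c hc
  have : pvDomStr data = true := hd
  unfold pvDomStr at this
  rw [List.all_eq_true] at this
  have := this c hc
  unfold pvDomChar at this
  simp only [Bool.or_eq_true, Bool.and_eq_true, decide_eq_true_eq, beq_iff_eq] at this
  omega

-- ===== VERDICT (by name: the statement is the Claim_ definition above) =====
theorem frame_data_spec : Claim_equal_frame_data := by
  intro data frame_size hdom _
  unfold Spec_frame_data frame_data frame_data_alt
  rw [PySem.List.foldl_append_singleton_eq_map, List.map_map]
  apply List.map_congr_left
  intro i _
  simp only [Function.comp]
  have hds : pvDomStr data = true := by
    unfold Dom_frame_data at hdom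
    simp only [Bool.and_eq_true] at hdom
    exact hdom.1
  have hcrc : pvCalcCrc ((PySem.List.slice data.toList (some i) (some (i + frame_size))).map Char.toNat)
            = pvZlibCrc32 ((PySem.List.slice data.toList (some i) (some (i + frame_size))).map Char.toNat) := by
    apply pvCrc_eq
    intro b hb
    simp only [List.mem_map] at hb
    obtain ⟨c, hc, rfl⟩ := hb
    exact pvChar_lt data hds c (PySem.List.mem_of_mem_slice _ _ _ hc)
  rw [hcrc]
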